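-- pv_equiv track=rewrite | github.com/guoylyy/uband-python-s1 | homeworks/A14075/final_homework/homework1.py | generDict
-- ===== SOURCE A (Python) =====
-- def generDict(words):
--     dic = {}
--     for word in words:
--         #删除空白和单字母
--         if len(word)>1:
--             if word in dic:
--                 dic[word]+=1
--             else :
--                 dic[word] = 1
--     return dic
-- ===== SOURCE B (Python) =====
-- def generDict(words):
--     # Remove-and-count: repeatedly take the first remaining long word, drop all
--     # its occurrences at once, and record the count as the length difference.
--     ws = [w for w in words if len(w) > 1]
--     items = []
--     while ws:
--         w = ws[0]
--         rest = [x for x in ws if x != w]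
--         items.append((w, len(ws) - len(rest)))
--         ws = rest
--     return dict(items)
-- ===== Notes on version B (the rewrite author's own statement) =====
-- stated objective: alternative
-- what changed: Replaces A's single incremental if-in-dict counting loop by a shrink-the-list loop: filter once, then repeatedly take the first remaining word, remove all its occurrences at once, and record its count as the length drop.
import Mathlib
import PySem

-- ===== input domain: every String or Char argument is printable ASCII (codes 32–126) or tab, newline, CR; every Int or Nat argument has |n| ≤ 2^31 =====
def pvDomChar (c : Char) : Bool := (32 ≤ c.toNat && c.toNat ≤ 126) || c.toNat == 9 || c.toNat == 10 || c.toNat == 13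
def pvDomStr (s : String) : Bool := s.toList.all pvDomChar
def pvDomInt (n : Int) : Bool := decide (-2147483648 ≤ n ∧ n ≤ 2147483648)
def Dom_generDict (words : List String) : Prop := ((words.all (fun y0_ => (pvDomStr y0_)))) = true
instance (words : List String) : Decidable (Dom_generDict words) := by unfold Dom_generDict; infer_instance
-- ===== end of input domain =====

-- B replaces A's single incremental counting loop by a shrink-the-list loop that takes the first
-- long word, removes all its occurrences at once, and counts it as the length drop (objective: alternative).

-- ===== PORT A =====
def generDict (words : List String) : List (String × Int) :=
  (words.foldl (fun dic word =>
      if PySem.Str.len word > 1 then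
        if dic.contains word then dic.modify word 0 (· + 1)
        else dic.insert word 1
      else dic) PySem.Dict.empty).items

-- ===== PORT B =====
-- B's while loop: state (ws, items); each step removes every occurrence of the first
-- word of ws and appends (word, length drop) to items; dict(items) is items itself
-- under the type convention (the appended keys are pairwise distinct).
def generDictLoop (ws : List String) (items : List (String × Int)) : List (String × Int) :=
  match ws with
  | [] => items
  | w :: t =>
    let rest := (w :: t).filter (fun x => x ≠ w)
    generDictLoop rest (items ++ [(w, ((w :: t).length : Int) - (rest.length : Int))])
termination_by ws.length
decreasing_by
  simp only [List.filter_cons, ne_eq, not_true_eq_false, decide_not, List.length_cons]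
  exact Nat.lt_succ_of_le (by simpa using List.length_filter_le (fun x => !decide (x = w)) t)

def generDict_alt (words : List String) : List (String × Int) :=
  generDictLoop (words.filter (fun w => PySem.Str.len w > 1)) []

-- ===== PRECONDITION & SPEC =====
def Spec_generDict (words : List String) (out : List (String × Int)) : Prop := out = generDict_alt words
instance (words : List String) (out : List (String × Int)) : Decidable (Spec_generDict words out) := by unfold Spec_generDict; infer_instance

-- ===== CLAIM (what is proved, stated in full; the proofs are below) =====
def Claim_equal_generDict : Prop := ∀ (words : List String), Dom_generDict words → Spec_generDict words (generDict words)

-- ===== LEMMAS AND PROOFS =====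

-- A's guarded loop body equals the Counter step on each word it keeps.
theorem generDict_body_eq (d : PySem.Dict String Int) (w : String) :
    (if PySem.Str.len w > 1 then
        if d.contains w then d.modify w 0 (· + 1) else d.insert w 1
      else d)
    = (if PySem.Str.len w > 1 then d.modify w 0 (· + 1) else d) := by
  split_ifs with h hc
  · rfl
  · apply PySem.Dict.ext
    simp [PySem.Dict.modify, PySem.Dict.getD_of_not_contains, hc]
  · rfl

-- A's guarded fold is the Counter fold over the filtered list.
theorem generDict_foldl_eq (words : List String) (d : PySem.Dict String Int) :
    words.foldl (fun dic word =>
      if PySem.Str.len word > 1 then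
        if dic.contains word then dic.modify word 0 (· + 1)
        else dic.insert word 1
      else dic) d
    = (words.filter (fun w => PySem.Str.len w > 1)).foldl
        (fun dic word => dic.modify word 0 (· + 1)) d := by
  induction words generalizing d with
  | nil => rfl
  | cons x xs ih =>
    by_cases h : PySem.Str.len x > 1
    · rw [List.foldl_cons, generDict_body_eq, if_pos h, List.filter_cons,
        decide_eq_true h, if_pos rfl, List.foldl_cons]
      exact ih _
    · rw [List.foldl_cons, generDict_body_eq, if_neg h, List.filter_cons,
        decide_eq_false h, if_neg Bool.false_ne_true]
      exact ih d

theorem generDict_eq_counter (words : List String) :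
    generDict words = (PySem.Dict.counter (words.filter (fun w => PySem.Str.len w > 1))).items := by
  unfold generDict
  rw [generDict_foldl_eq, PySem.Dict.counter_eq_foldl]

-- foldl Set.add over a prepended fresh element commutes with consing it in front.
theorem foldl_add_cons (l : List String) : ∀ (s : List String) (w : String), w ∉ l →
    l.foldl PySem.Set.add (w :: s) = w :: l.foldl PySem.Set.add s := by
  induction l with
  | nil => intro s w _; rfl
  | cons x t ih =>
    intro s w hw
    have hxw : x ≠ w := fun h => hw (h ▸ List.mem_cons_self)
    have hstep : PySem.Set.add (w :: s) x = w :: PySem.Set.add s x := by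
      by_cases hs : x ∈ s <;> simp [PySem.Set.add, PySem.Set.contains, hxw, hs]
    rw [List.foldl_cons, hstep, ih _ w (fun h => hw (List.mem_cons_of_mem _ h)), List.foldl_cons]

-- elements already present never change the foldl-add accumulator again.
theorem foldl_add_filter (l : List String) : ∀ (s : List String) (w : String), w ∈ s →
    l.foldl PySem.Set.add s = (l.filter (fun x => x ≠ w)).foldl PySem.Set.add s := by
  induction l with
  | nil => intro s w _; rfl
  | cons x t ih =>
    intro s w hw
    by_cases hx : x = w
    · subst hx
      have hadd : PySem.Set.add s x = s := by
        simp [PySem.Set.add, PySem.Set.contains, hw]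
      have hfc : (x :: t).filter (fun y => y ≠ x) = t.filter (fun y => y ≠ x) := by simp
      rw [hfc, List.foldl_cons, hadd]
      exact ih s x hw
    · have hmem : w ∈ PySem.Set.add s x := by
        simp only [PySem.Set.add]
        split
        · exact hw
        · exact List.mem_append_left _ hw
      simp only [List.filter_cons, ne_eq, hx, not_false_eq_true, decide_true, if_true,
        List.foldl_cons]
      exact ih _ w hmem

-- set(w :: t) is w followed by set of the tail with all w's removed.
theorem ofList_cons_filter (w : String) (t : List String) :
    PySem.Set.ofList (w :: t) = w :: PySem.Set.ofList (t.filter (fun x => x ≠ w)) := by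
  have h1 : PySem.Set.ofList (w :: t) = t.foldl PySem.Set.add [w] := by
    simp [PySem.Set.ofList_eq_foldl, PySem.Set.add, PySem.Set.contains]
  rw [h1, foldl_add_filter t [w] w (List.mem_singleton.mpr rfl),
    foldl_add_cons _ [] w (by simp), PySem.Set.ofList_eq_foldl]

-- counting w equals the length removed by filtering w out.
theorem count_eq_length_sub (w : String) (l : List String) :
    (l.filter (fun x => x ≠ w)).length + l.count w = l.length := by
  induction l with
  | nil => rfl
  | cons x t ih =>
    by_cases hx : x = w <;>
      simp only [List.filter_cons, hx, List.count_cons] <;>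
      simp_all <;> omega

-- non-accumulator form of B's loop, for the proofs.
def generDictGo (ws : List String) : List (String × Int) :=
  match ws with
  | [] => []
  | w :: t =>
    let rest := (w :: t).filter (fun x => x ≠ w)
    (w, ((w :: t).length : Int) - (rest.length : Int)) :: generDictGo rest
termination_by ws.length
decreasing_by
  simp only [List.filter_cons, ne_eq, not_true_eq_false, decide_not, List.length_cons]
  exact Nat.lt_succ_of_le (by simpa using List.length_filter_le (fun x => !decide (x = w)) t)

-- the accumulator loop is the non-accumulator recursion appended to its accumulator.
theorem generDictLoop_eq_go (n : ℕ) : ∀ (l : List String) (acc : List (String × Int)),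
    l.length ≤ n → generDictLoop l acc = acc ++ generDictGo l := by
  induction n with
  | zero =>
    intro l acc hl
    have h0 : l = [] := List.length_eq_zero_iff.mp (Nat.le_zero.mp hl)
    subst h0; simp [generDictLoop, generDictGo]
  | succ n ih =>
    intro l acc hl
    match l with
    | [] => simp [generDictLoop, generDictGo]
    | w :: t =>
      rw [generDictLoop, generDictGo]
      have hlen : ((w :: t).filter (fun x => x ≠ w)).length ≤ n := by
        have h1 : (w :: t).filter (fun x => x ≠ w) = t.filter (fun x => x ≠ w) := by simp
        rw [h1]
        have h2 := List.length_filter_le (fun x => decide (x ≠ w)) t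
        simp only [List.length_cons] at hl
        omega
      rw [ih _ _ hlen]
      simp

-- Counter's items over l are exactly B's remove-and-recurse result.
theorem counter_map_eq_go (n : ℕ) : ∀ (l : List String), l.length ≤ n →
    (PySem.Set.ofList l).map (fun k => (k, (l.count k : Int))) = generDictGo l := by
  induction n with
  | zero =>
    intro l hl
    have h0 : l = [] := List.length_eq_zero_iff.mp (Nat.le_zero.mp hl)
    subst h0; simp [generDictGo, PySem.Set.ofList_eq_foldl]
  | succ n ih =>
    intro l hl
    match l with
    | [] => simp [generDictGo, PySem.Set.ofList_eq_foldl]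
    | w :: t =>
      have hrest : (w :: t).filter (fun x => x ≠ w) = t.filter (fun x => x ≠ w) := by
        simp
      rw [generDictGo, ofList_cons_filter, List.map_cons]
      simp only [hrest]
      congr 1
      · have h := count_eq_length_sub w (w :: t)
        rw [hrest] at h
        congr 1
        omega
      · have hlen : (t.filter (fun x => x ≠ w)).length ≤ n := by
          have := List.length_filter_le (fun x => decide (x ≠ w)) t
          simp only [List.length_cons] at hl
          omega
        rw [← ih _ hlen]
        apply List.map_congr_left
        intro k hk
        have hkw : k ≠ w := by
          have h1 : k ∈ t.filter (fun x => x ≠ w) := (PySem.Set.mem_ofList _ _).mp hk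
          have h2 := List.of_mem_filter h1
          simpa using h2
        have hc : (t.filter (fun x => x ≠ w)).count k = (w :: t).count k := by
          rw [List.count_filter (by simp [hkw]), List.count_cons]
          simp [Ne.symm hkw]
        rw [hc]

-- ===== VERDICT (by name: the statement is the Claim_ definition above) =====
theorem generDict_spec : Claim_equal_generDict := by
  intro words _
  unfold Spec_generDict generDict_alt
  rw [generDictLoop_eq_go (words.filter (fun w => PySem.Str.len w > 1)).length _ _ le_rfl,
    List.nil_append, generDict_eq_counter, PySem.Dict.items_counter,
    counter_map_eq_go (words.filter (fun w => PySem.Str.len w > 1)).length _ le_rfl]
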